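-- pv_equiv track=rewrite | github.com/Arcadyuz/ClaseJulio8 | Reto_3MINTIC.py | reto_3
-- ===== SOURCE A (Python) =====
-- def reto_3(diccionario: dict) -> str:
--     mayor = None
--     key = None
--
-- #    if diccionario:
--
-- #        for k in diccionario:
-- #            if mayor is None:
-- #                mayor = diccionario[k]
-- #                key = k
-- #            elif diccionario[k]> mayor:
-- #                mayor = diccionario[k]
-- #                key = k
--
-- #        return key
--
-- #    return key
--
--     if diccionario:
--
--         valores = list(diccionario.values())
--         mayor = max(valores)
--         llaves = [k for k in diccionario if diccionario[k] == mayor]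
--
--     #for key, value in diccionario.items():
--     #    if value == mayor:
--     #        llaves.append(key)
--         return ", ".join(llaves)
--
--     #else:
--     return "None"
-- ===== SOURCE B (Python) =====
-- def reto_3(diccionario: dict) -> str:
--     mayor = None
--     llaves = []
--     for k, v in diccionario.items():
--         if mayor is None or v > mayor:
--             mayor = v
--             llaves = [k]
--         elif v == mayor:
--             llaves.append(k)
--     return ", ".join(llaves) if llaves else "None"
-- ===== Notes on version B (the rewrite author's own statement) =====
-- stated objective: simpler
-- what changed: Replaces A's two passes (max over values, then a filter scan with dict lookups, then join) by a single pass that tracks the running maximum and the list of keys attaining it.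
import Mathlib
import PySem

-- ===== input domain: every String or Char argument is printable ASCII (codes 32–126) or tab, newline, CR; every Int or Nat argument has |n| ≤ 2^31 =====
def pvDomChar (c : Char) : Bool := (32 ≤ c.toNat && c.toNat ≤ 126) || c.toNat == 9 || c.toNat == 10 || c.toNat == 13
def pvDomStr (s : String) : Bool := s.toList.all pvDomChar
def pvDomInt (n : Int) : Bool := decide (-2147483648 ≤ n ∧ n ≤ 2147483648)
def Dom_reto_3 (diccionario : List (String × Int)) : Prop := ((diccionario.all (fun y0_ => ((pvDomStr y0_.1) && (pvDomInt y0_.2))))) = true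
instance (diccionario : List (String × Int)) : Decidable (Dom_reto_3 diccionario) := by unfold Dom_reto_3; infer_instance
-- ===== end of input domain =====

-- B replaces A's two scans (max of the values, then a key-filter with dict lookups) by one
-- pass tracking the running maximum and the keys attaining it (objective: simpler).

-- ===== PORT A =====
-- 'if diccionario:' then max over values, list-comprehension over keys with lookup, join; else "None".
-- diccionario[k] is the dict lookup (first match in the association list); k comes from the keys, so it never raises.
def reto_3 (diccionario : List (String × Int)) : String :=
  if diccionario.isEmpty then "None"
  else
    let valores := diccionario.map Prod.snd
    let mayor := (PySem.List.max? valores (fun x => x)).getD 0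
    let llaves := (diccionario.map Prod.fst).filter
      (fun k => (((PySem.Dict.mk diccionario).get? k).getD 0) == mayor)
    PySem.Str.join ", " llaves

-- ===== PORT B =====
def reto3AltStep (acc : Option Int × List String) (kv : String × Int) : Option Int × List String :=
  match acc with
  | (none, _) => (some kv.2, [kv.1])
  | (some m, ls) =>
    if kv.2 > m then (some kv.2, [kv.1])
    else if kv.2 == m then (some m, ls ++ [kv.1])
    else (some m, ls)

def reto_3_alt (diccionario : List (String × Int)) : String :=
  let st := diccionario.foldl reto3AltStep (none, [])
  if st.2.isEmpty then "None" else PySem.Str.join ", " st.2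

-- ===== PRECONDITION & SPEC =====
-- Pre_ excludes association lists with a repeated key: they do not encode any Python dict
-- (dict construction collapses duplicates), so A's behaviour there is an artefact of the encoding.
def Pre_reto_3 (diccionario : List (String × Int)) : Prop :=
  (diccionario.map Prod.fst).Nodup
instance (diccionario : List (String × Int)) : Decidable (Pre_reto_3 diccionario) := by unfold Pre_reto_3; infer_instance

def pvWitness_reto_3 : (List (String × Int)) := [("a", 3), ("b", 7), ("c", 7)]

def Spec_reto_3 (diccionario : List (String × Int)) (out : String) : Prop := out = reto_3_alt diccionario
instance (diccionario : List (String × Int)) (out : String) : Decidable (Spec_reto_3 diccionario out) := by unfold Spec_reto_3; infer_instance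

-- ===== CLAIM (what is proved, stated in full; the proofs are below) =====
def Claim_equal_reto_3 : Prop := ∀ (diccionario : List (String × Int)), Dom_reto_3 diccionario → Pre_reto_3 diccionario → Spec_reto_3 diccionario (reto_3 diccionario)

-- ===== LEMMAS AND PROOFS =====

-- running maximum over the second components
def runMax (m : Int) (t : List (String × Int)) : Int := t.foldl (fun a p => max a p.2) m

theorem runMax_cons (m : Int) (h : String × Int) (t : List (String × Int)) :
    runMax m (h :: t) = runMax (max m h.2) t := rfl

theorem le_runMax (m : Int) (t : List (String × Int)) : m ≤ runMax m t := by
  induction t generalizing m with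
  | nil => simp [runMax]
  | cons h t ih => exact le_trans (le_max_left m h.2) (ih (max m h.2))

-- B's loop, started from (some m, ls), computes the running max and the keys attaining it.
theorem foldl_step_some (t : List (String × Int)) (m : Int) (ls : List String) :
    t.foldl reto3AltStep (some m, ls) =
      (some (runMax m t),
       (if m = runMax m t then ls else []) ++ (t.filter (fun p => p.2 == runMax m t)).map Prod.fst) := by
  induction t generalizing m ls with
  | nil => simp [runMax]
  | cons h t ih =>
    rw [runMax_cons]
    have hM : max m h.2 ≤ runMax (max m h.2) t := le_runMax _ t
    by_cases hgt : h.2 > m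
    · rw [show ((h :: t).foldl reto3AltStep (some m, ls)) = t.foldl reto3AltStep (some h.2, [h.1]) by
        simp [reto3AltStep, hgt]]
      rw [ih]
      have hmax : max m h.2 = h.2 := by omega
      rw [hmax] at hM ⊢
      have hmne : ¬ m = runMax h.2 t := by omega
      rw [if_neg hmne]
      simp only [List.filter_cons, List.nil_append, Prod.mk.injEq, true_and]
      by_cases he : h.2 = runMax h.2 t
      · simp only [← he]
        simp
      · simp [he]
    · by_cases heq : h.2 = m
      · rw [show ((h :: t).foldl reto3AltStep (some m, ls)) = t.foldl reto3AltStep (some m, ls ++ [h.1]) by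
          simp [reto3AltStep, heq]]
        rw [ih]
        have hmax : max m h.2 = m := by omega
        rw [hmax]
        simp only [List.filter_cons, heq, Prod.mk.injEq, true_and]
        by_cases he : m = runMax m t
        · simp only [← he]
          simp
        · simp [he]
      · have hlt : h.2 < m := by omega
        rw [show ((h :: t).foldl reto3AltStep (some m, ls)) = t.foldl reto3AltStep (some m, ls) by
          simp [reto3AltStep, hgt, heq]]
        rw [ih]
        have hmax : max m h.2 = m := by omega
        rw [hmax] at hM ⊢
        have hne : ¬ h.2 = runMax m t := by omega
        simp [hne]

-- the running maximum is attained by the seed or by some element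
theorem runMax_attained (m : Int) (t : List (String × Int)) :
    runMax m t = m ∨ ∃ p ∈ t, p.2 = runMax m t := by
  induction t generalizing m with
  | nil => left; rfl
  | cons q t ih =>
    rw [runMax_cons]
    rcases ih (max m q.2) with hc | ⟨p, hp, hpe⟩
    · rcases le_or_gt q.2 m with hle | hlt
      · left; rw [hc]; omega
      · right; exact ⟨q, by simp, by rw [hc]; omega⟩
    · right; exact ⟨p, by simp [hp], hpe⟩

theorem get?_mk_of_mem (d : List (String × Int)) (p : String × Int)
    (hp : p ∈ d) (hnd : (d.map Prod.fst).Nodup) :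
    (PySem.Dict.mk d).get? p.1 = some p.2 := by
  induction d with
  | nil => cases hp
  | cons q t ih =>
    simp only [List.map_cons, List.nodup_cons] at hnd
    rw [PySem.Dict.get?_mk_cons]
    cases hp with
    | head => simp
    | tail _ hp =>
      have hne : (q.1 == p.1) = false := by
        simp only [beq_eq_false_iff_ne]
        intro he
        exact hnd.1 (he ▸ List.mem_map_of_mem hp)
      rw [hne]
      exact ih hp hnd.2

-- under Nodup keys, A's key-filter with lookups equals B's filter of the pairs
theorem lookup_filter_eq (d t : List (String × Int)) (M : Int)
    (hsub : ∀ p ∈ t, p ∈ d) (hnd : (d.map Prod.fst).Nodup) :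
    (t.map Prod.fst).filter (fun k => (((PySem.Dict.mk d).get? k).getD 0) == M) =
    (t.filter (fun p => p.2 == M)).map Prod.fst := by
  induction t with
  | nil => rfl
  | cons p t ih =>
    have hget : (PySem.Dict.mk d).get? p.1 = some p.2 :=
      get?_mk_of_mem d p (hsub p (List.mem_cons_self ..)) hnd
    simp only [List.map_cons, List.filter_cons, hget, Option.getD_some]
    by_cases he : (p.2 == M) = true
    · rw [if_pos he, if_pos he, List.map_cons, ih (fun q hq => hsub q (List.mem_cons_of_mem _ hq))]
    · rw [if_neg he, if_neg he, ih (fun q hq => hsub q (List.mem_cons_of_mem _ hq))]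

-- ===== VERDICT (by name: the statement is the Claim_ definition above) =====
theorem reto_3_spec : Claim_equal_reto_3 := by
  intro d _ hpre
  unfold Spec_reto_3 reto_3 reto_3_alt
  cases d with
  | nil => rfl
  | cons h t =>
    simp only [List.isEmpty_cons, Bool.false_eq_true, if_false, List.map_cons,
      PySem.List.max?_id_cons, Option.getD_some, List.foldl_cons]
    rw [show reto3AltStep (none, []) h = (some h.2, [h.1]) from rfl, foldl_step_some]
    have hrm : (List.map Prod.snd t).foldl max h.2 = runMax h.2 t := by
      rw [List.foldl_map]; rfl
    rw [hrm]
    have hlf := lookup_filter_eq (h :: t) (h :: t) (runMax h.2 t) (fun p hp => hp) hpre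
    simp only [List.map_cons] at hlf
    rw [hlf]
    simp only [List.filter_cons]
    rcases runMax_attained h.2 t with hc | ⟨p, hp, hpe⟩
    · simp [hc]
    · have hne : (t.filter (fun p => p.2 == runMax h.2 t)).map Prod.fst ≠ [] := by
        have hmem : p ∈ t.filter (fun p => p.2 == runMax h.2 t) :=
          List.mem_filter.mpr ⟨hp, by simp [hpe]⟩
        exact fun hnil => by simpa [hnil] using List.mem_map_of_mem (f := Prod.fst) hmem
      by_cases he : h.2 = runMax h.2 t
      · simp only [← he]
        simp
      · simp [he]
        intro hall
        exact absurd hpe (hall p.1 p.2 hp)
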